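-- pv_equiv track=rewrite | github.com/wherby/code | algorithm/mathA/combination/questions/证明杨辉倒三角相减.py | combls
-- ===== SOURCE A (Python) =====
-- import math
--
-- def combls(ls):
--     ls1,ls2 = ls[:-1],ls[1:]
--     def getComb(ls):
--         m = len(ls)
--         acc =0
--         for i,a in enumerate(ls,0):
--             acc += math.comb(m-1,i)*a
--         return acc
--     return (getComb(ls1),getComb(ls2))
-- ===== SOURCE B (Python) =====
-- def combls(ls):
--     # One pass with the incremental binomial recurrence C(n,i+1) = C(n,i)*(n-i)//(i+1);
--     # both of A's slice-sums share the same weights C(m-2, i), so compute them together.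
--     m = len(ls)
--     acc1 = acc2 = 0
--     c = 1
--     for i in range(m - 1):
--         acc1 += c * ls[i]
--         acc2 += c * ls[i + 1]
--         c = c * (m - 2 - i) // (i + 1)
--     return (acc1, acc2)
-- ===== Notes on version B (the rewrite author's own statement) =====
-- stated objective: faster
-- what changed: Instead of slicing twice and calling math.comb for every element (each comb call costs O(i) big-int work), B makes a single pass over the indices, maintaining the binomial coefficient incrementally via C(n,i+1)=C(n,i)*(n-i)//(i+1) and accumulating both weighted sums at once (both slices share the same weights C(m-2,i)).
import Mathlib
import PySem

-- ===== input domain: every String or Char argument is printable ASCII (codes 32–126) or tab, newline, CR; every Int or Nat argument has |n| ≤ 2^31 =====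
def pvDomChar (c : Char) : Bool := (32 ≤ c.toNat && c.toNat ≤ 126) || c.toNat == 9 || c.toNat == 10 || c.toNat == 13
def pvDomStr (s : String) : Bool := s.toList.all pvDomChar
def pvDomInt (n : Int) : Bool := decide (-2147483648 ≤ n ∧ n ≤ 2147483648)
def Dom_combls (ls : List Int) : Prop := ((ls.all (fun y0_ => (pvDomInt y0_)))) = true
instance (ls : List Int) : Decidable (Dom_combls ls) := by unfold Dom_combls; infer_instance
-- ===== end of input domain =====

-- B computes both slice-sums in ONE pass with the incremental binomial recurrence
-- C(n,i+1) = C(n,i)*(n-i)//(i+1), replacing A's per-element math.comb calls (faster: asymptotic).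

-- ===== PORT A =====
-- getComb: math.comb(m-1, i) is only evaluated with 0 ≤ i ≤ m-1 (the list is nonempty
-- inside the loop), where it equals Nat.choose (m-1) i exactly.
def combGetA (l : List Int) : Int :=
  let m := l.length
  (PySem.List.enumerate l 0).foldl (fun acc p => acc + ((m - 1).choose p.1.toNat : Int) * p.2) 0

def combls (ls : List Int) : List Int :=
  let ls1 := PySem.List.slice ls none (some (-1))
  let ls2 := PySem.List.slice ls (some 1) none
  [combGetA ls1, combGetA ls2]

-- ===== PORT B =====
def combls_alt (ls : List Int) : List Int :=
  let m : Int := ls.length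
  let st := (PySem.List.pyRange 0 (m - 1) 1).foldl
    (fun (st : Int × Int × Int) i =>
      (st.1 + st.2.2 * PySem.List.pyGetD ls i 0,
       st.2.1 + st.2.2 * PySem.List.pyGetD ls (i + 1) 0,
       PySem.Int.floordiv (st.2.2 * (m - 2 - i)) (i + 1))) (0, 0, 1)
  [st.1, st.2.1]

-- ===== PRECONDITION & SPEC =====
def Spec_combls (ls : List Int) (out : List Int) : Prop := out = combls_alt ls
instance (ls : List Int) (out : List Int) : Decidable (Spec_combls ls out) := by unfold Spec_combls; infer_instance

-- ===== CLAIM (what is proved, stated in full; the proofs are below) =====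
def Claim_equal_combls : Prop := ∀ (ls : List Int), Dom_combls ls → Spec_combls ls (combls ls)

-- ===== LEMMAS AND PROOFS =====

-- weighted sum Σ_k C(M, s+k) * l[k], the value A's getComb accumulates
def wsum (M : Nat) : Nat → List Int → Int
  | _, [] => 0
  | s, x :: xs => (M.choose s : Int) * x + wsum M (s + 1) xs

theorem wsum_append_singleton (M : Nat) (x : Int) :
    ∀ (xs : List Int) (s : Nat),
      wsum M s (xs ++ [x]) = wsum M s xs + (M.choose (s + xs.length) : Int) * x := by
  intro xs
  induction xs with
  | nil => intro s; simp [wsum]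
  | cons y ys ih =>
      intro s
      simp only [List.cons_append, wsum, ih (s + 1), List.length_cons]
      have h : s + 1 + ys.length = s + (ys.length + 1) := by omega
      rw [h]; ring

theorem afold (Mn : Nat) :
    ∀ (l : List Int) (s : Nat) (acc : Int),
      (PySem.List.enumerate l (s : Int)).foldl
        (fun acc p => acc + (Mn.choose p.1.toNat : Int) * p.2) acc
      = acc + wsum Mn s l := by
  intro l
  induction l with
  | nil => intro s acc; simp [PySem.List.enumerate, wsum]
  | cons x xs ih =>
      intro s acc
      rw [PySem.List.enumerate_cons, List.foldl_cons]
      have : ((s : Int) + 1) = ((s + 1 : Nat) : Int) := by push_cast; ring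
      rw [this, ih (s + 1)]
      simp [wsum]
      ring

theorem combGetA_eq_wsum (l : List Int) :
    combGetA l = wsum (l.length - 1) 0 l := by
  unfold combGetA
  have := afold (l.length - 1) l 0 0
  simpa using this

-- the incremental-c update of B: from C(M,n) it produces C(M,n+1)
theorem cstep (M n : Nat) :
    PySem.Int.floordiv ((M.choose n : Int) * ((M : Int) - (n : Int))) ((n : Int) + 1)
      = (M.choose (n + 1) : Int) := by
  by_cases h : n ≤ M
  · have h1 : (M : Int) - (n : Int) = ((M - n : Nat) : Int) := by omega
    have h2 : ((n : Int) + 1) = ((n + 1 : Nat) : Int) := by push_cast; ring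
    rw [h1, h2, ← Nat.cast_mul, PySem.Int.floordiv_natCast]
    congr 1
    rw [← Nat.choose_succ_right_eq]
    exact Nat.mul_div_cancel _ (by omega)
  · have h1 : M.choose n = 0 := Nat.choose_eq_zero_of_lt (by omega)
    have h2 : M.choose (n + 1) = 0 := Nat.choose_eq_zero_of_lt (by omega)
    simp [h1, h2, PySem.Int.floordiv]

theorem bfold (ls : List Int) (M : Nat) (hlen : ls.length = M + 2) :
    ∀ (n : Nat), n ≤ M + 1 →
      (PySem.List.pyRange 0 (n : Int) 1).foldl
        (fun (st : Int × Int × Int) i =>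
          (st.1 + st.2.2 * PySem.List.pyGetD ls i 0,
           st.2.1 + st.2.2 * PySem.List.pyGetD ls (i + 1) 0,
           PySem.Int.floordiv (st.2.2 * ((ls.length : Int) - 2 - i)) (i + 1))) (0, 0, 1)
      = (wsum M 0 (ls.take n), wsum M 0 (ls.tail.take n), (M.choose n : Int)) := by
  intro n
  induction n with
  | zero => intro _; simp [wsum]
  | succ k ih =>
      intro hk
      have hk' : k ≤ M + 1 := by omega
      have hcast : ((k + 1 : Nat) : Int) = (k : Int) + 1 := by push_cast; ring
      rw [hcast, PySem.List.pyRange_one_succ_right (by positivity), List.foldl_append, ih hk']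
      have hklt : k < ls.length := by omega
      have hk1lt : k + 1 < ls.length := by omega
      have hg1 : PySem.List.pyGetD ls (k : Int) 0 = ls[k] := by
        simp [List.getElem?_eq_getElem hklt]
      have hg2 : PySem.List.pyGetD ls ((k : Int) + 1) 0 = ls[k + 1] := by
        rw [show ((k : Int) + 1) = ((k + 1 : Nat) : Int) by push_cast; ring,
          PySem.List.pyGetD_natCast]
        simp [List.getD_eq_getElem?_getD, List.getElem?_eq_getElem hk1lt]
      have ht1 : ls.take (k + 1) = ls.take k ++ [ls[k]] := by
        rw [List.take_add_one, List.getElem?_eq_getElem hklt]; rfl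
      have htail : ls.tail.length = M + 1 := by simp [hlen]
      have hktl : k < ls.tail.length := by omega
      have ht2 : ls.tail.take (k + 1) = ls.tail.take k ++ [ls[k + 1]] := by
        rw [List.take_add_one, List.getElem?_eq_getElem hktl]
        simp [List.getElem_tail]
      have hM : (ls.length : Int) - 2 - (k : Int) = (M : Int) - (k : Int) := by
        rw [hlen]; push_cast; ring
      simp only [List.foldl_cons, List.foldl_nil, hg1, hg2, hM, cstep M k, ht1, ht2,
        wsum_append_singleton]
      have hlk : (ls.take k).length = k := List.length_take_of_le (by omega)
      have hlk2 : (ls.tail.take k).length = k := List.length_take_of_le (by omega)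
      rw [hlk, hlk2]
      simp

-- ===== VERDICT (by name: the statement is the Claim_ definition above) =====
theorem combls_spec : Claim_equal_combls := by
  intro ls _
  unfold Spec_combls combls combls_alt
  simp only [PySem.List.slice_to_neg_one, PySem.List.slice_from_one]
  match hls : ls with
  | [] => decide
  | [x] => norm_num [combGetA, PySem.List.enumerate, PySem.List.pyRange_one_eq_nil]
  | x :: y :: rest =>
      set l := x :: y :: rest with hl
      have h2le : 2 ≤ l.length := by simp [hl]
      have hlen : l.length = (l.length - 2) + 2 := by omega
      have hm1 : ((l.length : Int) - 1) = ((l.length - 1 : Nat) : Int) := by omega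
      rw [hm1]
      rw [bfold l (l.length - 2) hlen (l.length - 1) (by omega)]
      have hd : l.dropLast = l.take (l.length - 1) := List.dropLast_eq_take
      have htk : l.tail.take (l.length - 1) = l.tail := by
        apply List.take_of_length_le; simp
      rw [combGetA_eq_wsum, combGetA_eq_wsum, hd, htk]
      have h1 : (l.dropLast).length - 1 = l.length - 2 := by simp [hl]
      have h2 : (l.tail).length - 1 = l.length - 2 := by simp [hl]
      rw [hd] at h1
      rw [h1, h2]
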